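-- pv_equiv track=rewrite | github.com/KATTA-00/Competitive-Programming | Competitions/aces_pre_coders_v9/BiggestIsland.py | find_largest_island
-- ===== SOURCE A (Python) =====
-- def is_valid(x, y, n, m):
--     return 0 <= x < n and 0 <= y < m
--
-- def dfs(grid, x, y, n, m):
--     if not is_valid(x, y, n, m) or grid[x][y] == 0:
--         return 0
--
--     grid[x][y] = 0  # Mark the cell as visited
--     area = 1  # Initialize area for this island
--
--     # 8-adjacent directions
--     directions = [(1, 0), (-1, 0), (0, 1), (0, -1), (1, 1), (-1, -1), (1, -1), (-1, 1)]
--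
--     for dx, dy in directions:
--         new_x, new_y = x + dx, y + dy
--         area += dfs(grid, new_x, new_y, n, m)
--
--     return area
--
-- def find_largest_island(grid):
--     n = len(grid)
--     m = len(grid[0])
--     max_area = 0
--
--     for i in range(n):
--         for j in range(m):
--             if grid[i][j] == 1:
--                 island_area = dfs(grid, i, j, n, m)
--                 max_area = max(max_area, island_area)
--
--     return max_area
-- ===== SOURCE B (Python) =====
-- def find_largest_island(grid):
--     n = len(grid)
--     m = len(grid[0])
--     max_area = 0
--     directions = [(1, 0), (-1, 0), (0, 1), (0, -1), (1, 1), (-1, -1), (1, -1), (-1, 1)]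
--     for i in range(n):
--         for j in range(m):
--             if grid[i][j] == 1:
--                 area = 0
--                 stack = [(i, j)]
--                 while stack:
--                     x, y = stack.pop()
--                     if not (0 <= x < n and 0 <= y < m) or grid[x][y] == 0:
--                         continue
--                     grid[x][y] = 0
--                     area += 1
--                     for dx, dy in reversed(directions):
--                         stack.append((x + dx, y + dy))
--                 max_area = max(max_area, area)
--     return max_area
-- ===== Notes on version B (the rewrite author's own statement) =====
-- stated objective: idiomatic
-- what changed: A's recursive 8-neighbour DFS is replaced by an iterative flood fill with an explicit stack (pop a cell, guard, zero it, push its 8 neighbours), keeping the same outer double loop and in-place zeroing; the explicit stack removes per-cell Python function-call/recursion overhead and the recursion-depth limit.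
import Mathlib
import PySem

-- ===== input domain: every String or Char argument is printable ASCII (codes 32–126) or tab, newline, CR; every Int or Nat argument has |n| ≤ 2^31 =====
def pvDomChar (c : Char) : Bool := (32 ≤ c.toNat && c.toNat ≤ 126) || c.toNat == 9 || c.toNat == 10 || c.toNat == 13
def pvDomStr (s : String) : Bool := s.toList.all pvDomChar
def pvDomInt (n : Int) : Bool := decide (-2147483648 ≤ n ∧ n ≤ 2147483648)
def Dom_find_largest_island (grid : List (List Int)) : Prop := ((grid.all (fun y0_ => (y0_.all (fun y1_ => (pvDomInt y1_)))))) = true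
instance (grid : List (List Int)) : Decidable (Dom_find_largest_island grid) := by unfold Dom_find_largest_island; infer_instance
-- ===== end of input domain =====

-- B replaces A's recursive dfs by an iterative flood fill with an explicit stack (same outer
-- double loop, same in-place zeroing of visited cells); objective: idiomatic, no speed claim.
-- Both Pythons mutate `grid` in place identically; the equivalence proved here is about the
-- return value (the ports thread the grid functionally).

-- ===== PORT A =====
-- helpers shared by both ports: cell read/write and the 8 directions, exactly as in the Pythons
def dirsL : List (Int × Int) := [(1,0),(-1,0),(0,1),(0,-1),(1,1),(-1,-1),(1,-1),(-1,1)]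
def validL (x y n m : Int) : Bool := decide (0 ≤ x ∧ x < n ∧ 0 ≤ y ∧ y < m)
-- grid[x][y]; the .getD 0 is unreachable on Pre_ inputs (access is guarded by validL / loop bounds)
def gget (g : List (List Int)) (x y : Int) : Int :=
  (PySem.List.pyGet? ((PySem.List.pyGet? g x).getD []) y).getD 0
-- grid[x][y] = 0; .toNat is exact here since writes happen only with 0 ≤ x, 0 ≤ y
def gset (g : List (List Int)) (x y : Int) : List (List Int) :=
  g.modify x.toNat (fun row => row.modify y.toNat (fun _ => 0))

-- A's recursive dfs; fuel bounds the number of calls (each call consumes one unit and passes the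
-- leftover on — the `min … f` is only a totality guard, provably the identity), the grid is
-- threaded functionally in place of Python's mutation.
mutual
def dfsA : Nat → List (List Int) → Int → Int → Int → Int → Int × List (List Int) × Nat
  | 0, g, _, _, _, _ => (0, g, 0)
  | f+1, g, x, y, n, m =>
    if !validL x y n m || gget g x y == 0 then (0, g, f)
    else
      let q := dfsList f (gset g x y) x y n m dirsL
      (1 + q.1, q.2)
termination_by f _ _ _ _ _ => (f, 0)

-- the `for dx, dy in directions: area += dfs(...)` loop of A, as structural recursion
def dfsList : Nat → List (List Int) → Int → Int → Int → Int → List (Int × Int) → Int × List (List Int) × Nat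
  | f, g, _, _, _, _, [] => (0, g, f)
  | f, g, x, y, n, m, d :: rest =>
    let r := dfsA f g (x + d.1) (y + d.2) n m
    let r2 := dfsList (min r.2.2 f) r.2.1 x y n m rest
    (r.1 + r2.1, r2.2)
termination_by f _ _ _ _ _ L => (f, L.length + 1)
decreasing_by
  all_goals first
    | exact Prod.Lex.left _ _ (Nat.lt_succ_self _)
    | exact Prod.Lex.right _ (by simp only [List.length_cons]; omega)
    | (rcases Nat.lt_or_eq_of_le (Nat.min_le_right _ _) with h | h
       · exact Prod.Lex.left _ _ h
       · (rw [h]; exact Prod.Lex.right _ (by simp only [List.length_cons]; omega)))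
end

def find_largest_island (grid : List (List Int)) : Int :=
  let n : Int := grid.length
  let m : Int := (grid.headD []).length
  -- one dfs performs at most 1 + 8·n·m calls, so this fuel never runs out
  let fuel : Nat := 8 * grid.length * (grid.headD []).length + 1
  ((PySem.List.pyRange 0 n 1).foldl (fun (s : Int × List (List Int)) i =>
      (PySem.List.pyRange 0 m 1).foldl (fun (s : Int × List (List Int)) j =>
        if gget s.2 i j == 1 then
          let d := dfsA fuel s.2 i j n m
          (max s.1 d.1, d.2.1)
        else s) s) (0, grid)).1

-- ===== PORT B =====
-- B's while-loop over the explicit stack (head = top; pushing reversed(directions) one by one in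
-- Python equals prepending the directions-ordered neighbour list); one fuel unit per pop.
def stackB : Nat → List (List Int) → Int → Int → List (Int × Int) → Int → Int × List (List Int)
  | _, g, _, _, [], area => (area, g)
  | 0, g, _, _, _ :: _, area => (area, g)
  | f+1, g, n, m, (x,y) :: S, area =>
    if !validL x y n m || gget g x y == 0 then stackB f g n m S area
    else stackB f (gset g x y) n m (dirsL.map (fun d => (x + d.1, y + d.2)) ++ S) (area + 1)

def find_largest_island_alt (grid : List (List Int)) : Int :=
  let n : Int := grid.length
  let m : Int := (grid.headD []).length
  -- one flood fill pops at most 1 + 8·n·m cells, so this fuel never runs out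
  let fuel : Nat := 8 * grid.length * (grid.headD []).length + 1
  ((PySem.List.pyRange 0 n 1).foldl (fun (s : Int × List (List Int)) i =>
      (PySem.List.pyRange 0 m 1).foldl (fun (s : Int × List (List Int)) j =>
        if gget s.2 i j == 1 then
          let p := stackB fuel s.2 n m [(i, j)] 0
          (max s.1 p.1, p.2)
        else s) s) (0, grid)).1

-- ===== PRECONDITION & SPEC =====
-- Pre_ excludes exactly the inputs where Python A raises IndexError: the empty grid (len(grid[0]))
-- and grids with a row shorter than the first row (grid[i][j] for j < len(grid[0])).
def Pre_find_largest_island (grid : List (List Int)) : Prop :=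
  grid ≠ [] ∧ ∀ r ∈ grid, (grid.headD []).length ≤ r.length
instance (grid : List (List Int)) : Decidable (Pre_find_largest_island grid) := by
  unfold Pre_find_largest_island; infer_instance
def pvWitness_find_largest_island : List (List Int) := [[1, 0], [0, 1]]
def Spec_find_largest_island (grid : List (List Int)) (out : Int) : Prop := out = find_largest_island_alt grid
instance (grid : List (List Int)) (out : Int) : Decidable (Spec_find_largest_island grid out) := by unfold Spec_find_largest_island; infer_instance

-- ===== CLAIM (what is proved, stated in full; the proofs are below) =====
def Claim_equal_find_largest_island : Prop := ∀ (grid : List (List Int)), Dom_find_largest_island grid → Pre_find_largest_island grid → Spec_find_largest_island grid (find_largest_island grid)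

-- ===== LEMMAS AND PROOFS =====

-- proof-side machine: a stack of pending dfs calls, run left to right with threaded fuel
def runCalls : Nat → List (List Int) → Int → Int → List (Int × Int) → Int → Int × List (List Int) × Nat
  | f, g, _, _, [], acc => (acc, g, f)
  | f, g, n, m, c :: S, acc =>
    let r := dfsA f g c.1 c.2 n m
    runCalls (min r.2.2 f) r.2.1 n m S (acc + r.1)

theorem dfsList_fuel_le (L : List (Int × Int)) : ∀ (f : Nat) (g : List (List Int)) (x y n m : Int),
    (dfsList f g x y n m L).2.2 ≤ f := by
  induction L with
  | nil => intro f g x y n m; simp [dfsList]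
  | cons d rest ih =>
    intro f g x y n m
    simp only [dfsList]
    exact le_trans (ih _ _ _ _ _ _) (Nat.min_le_right _ _)

theorem runCalls_zero (S : List (Int × Int)) : ∀ (g : List (List Int)) (n m : Int) (acc : Int),
    runCalls 0 g n m S acc = (acc, g, 0) := by
  induction S with
  | nil => intro g n m acc; simp [runCalls]
  | cons c S ih => intro g n m acc; simp [runCalls, dfsA, ih]

theorem runCalls_append_map (x y n m : Int) (L : List (Int × Int)) :
    ∀ (f : Nat) (g : List (List Int)) (S : List (Int × Int)) (acc : Int),
    runCalls f g n m (L.map (fun d => (x + d.1, y + d.2)) ++ S) acc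
      = runCalls (dfsList f g x y n m L).2.2 (dfsList f g x y n m L).2.1 n m S
          (acc + (dfsList f g x y n m L).1) := by
  induction L with
  | nil => intro f g S acc; simp [dfsList]
  | cons d rest ih =>
    intro f g S acc
    simp only [List.map_cons, List.cons_append, runCalls, dfsList]
    rw [ih]
    rw [add_assoc]

theorem stackB_eq_runCalls (f : Nat) : ∀ (g : List (List Int)) (n m : Int)
    (S : List (Int × Int)) (area : Int),
    stackB f g n m S area = ((runCalls f g n m S area).1, (runCalls f g n m S area).2.1) := by
  induction f with
  | zero =>
    intro g n m S area
    cases S with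
    | nil => simp [stackB, runCalls]
    | cons c S => simp [stackB, runCalls_zero]
  | succ f ih =>
    intro g n m S area
    cases S with
    | nil => simp [stackB, runCalls]
    | cons c S =>
      obtain ⟨x, y⟩ := c
      by_cases h : (!validL x y n m || gget g x y == 0) = true
      · simp only [stackB, runCalls, dfsA, h, if_pos]
        rw [ih]
        simp
      · simp only [stackB, runCalls, dfsA, h, if_neg, Bool.not_eq_true]
        rw [ih, runCalls_append_map]
        have hle : (dfsList f (gset g x y) x y n m dirsL).2.2 ≤ f+1 :=
          le_trans (dfsList_fuel_le _ _ _ _ _ _ _) (Nat.le_succ f)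
        rw [Nat.min_eq_left hle]
        have : area + 1 + (dfsList f (gset g x y) x y n m dirsL).1
            = area + (1 + (dfsList f (gset g x y) x y n m dirsL).1) := by ring
        rw [this]

theorem stackB_singleton (f : Nat) (g : List (List Int)) (i j n m : Int) :
    stackB f g n m [(i, j)] 0 = ((dfsA f g i j n m).1, (dfsA f g i j n m).2.1) := by
  rw [stackB_eq_runCalls]
  simp [runCalls]

-- ===== VERDICT (by name: the statement is the Claim_ definition above) =====
theorem find_largest_island_spec : Claim_equal_find_largest_island := by
  intro grid _ _
  unfold Spec_find_largest_island find_largest_island find_largest_island_alt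
  simp only []
  congr 2
  funext s i
  congr 1
  funext s j
  rw [stackB_singleton]
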